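-- pv_equiv track=rewrite | github.com/lif4635/harurun-s-library | library/list/inversion_cnt.py | inversion_cnt
-- ===== SOURCE A (Python) =====
-- class BIT:
--     def __init__(self, n):
--         self.n = n
--         self.data = [0]*(n+1)
--
--     def add(self, p, x):
--         p += 1
--         while p < self.n:
--             self.data[p] += x
--             p += p& -p
--
--     def sum0(self, r):
--         s = 0
--         while r > 0:
--             s += self.data[r]
--             r -= r& -r
--         return s
--
--     def sum(self, l, r):
--         return self.sum0(r) - self.sum0(l)
--
--     def get(self, p):
--         return self.sum0(p+1) - self.sum0(p)
--
--     def __str__(self):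
--         return str([self.get(i) for i in range(self.n)])
--
-- def inversion_cnt(lst:list) -> int:
--     """
--     i > j && a_i < a_j
--     """
--     n = len(lst)
--     maxlst = max(lst)
--
--     if  maxlst >= n+10:
--         order = {x:i for i,x in enumerate(sorted(set(lst)))}
--         lst = [order[x] for x in lst]
--
--     ft = BIT(n+10)
--     ans = [0]*n
--     for i in range(n):
--         ans[i] = ft.sum(lst[i]+1,n)
--         ft.add(lst[i], 1)
--
--     return ans
-- ===== SOURCE B (Python) =====
-- def inversion_cnt(lst: list) -> int:
--     """
--     i > j && a_i < a_j
--     """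
--     res = []
--     for i, x in enumerate(lst):
--         res.append(sum(1 for y in lst[:i] if y > x))
--     return res
-- ===== Notes on version B (the rewrite author's own statement) =====
-- stated objective: simpler
-- what changed: Replaces the Fenwick tree plus coordinate-compression machinery with a direct two-line nested scan that counts, for each position, the earlier elements greater than it.
-- intended difference: On nonempty lists of nonnegative ints with every element < n+10 (so A skips coordinate compression while elements can overflow its Fenwick query range), exactly when an element >= n precedes an element <= n+8, or an element in a residual band around n+9-lowbit(n+10) precedes an element equal to n+9, A returns silent under-counts and even negative counts, while B returns the true counts of earlier greater elements, which is the function's documented purpose (witness [9, 1]). — e.g. on inversion_cnt([9, 1]): A returns [0, 0], B returns [0, 1]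
import Mathlib
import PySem

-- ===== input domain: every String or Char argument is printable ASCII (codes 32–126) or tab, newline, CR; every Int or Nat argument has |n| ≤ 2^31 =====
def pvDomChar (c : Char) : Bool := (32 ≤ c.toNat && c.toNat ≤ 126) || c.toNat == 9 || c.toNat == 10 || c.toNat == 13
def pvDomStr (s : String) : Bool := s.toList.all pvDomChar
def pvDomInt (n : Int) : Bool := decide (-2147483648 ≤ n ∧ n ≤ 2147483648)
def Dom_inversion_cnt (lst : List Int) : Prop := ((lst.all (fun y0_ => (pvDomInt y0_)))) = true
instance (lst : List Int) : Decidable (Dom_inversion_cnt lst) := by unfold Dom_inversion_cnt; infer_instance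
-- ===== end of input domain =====

-- B replaces A's Fenwick tree + coordinate compression with a direct nested scan (simpler, O(n^2));
-- outside D_ (the band where A silently miscounts) both return the counts of earlier greater elements.


-- ===== PORT A =====
-- Python's `p & -p` (lowest set bit for positive p)
def pvLowbit (p : Int) : Int := PySem.Int.band p (-p)

-- BIT.add: `p += 1; while p < self.n: self.data[p] += x; p += p & -p`.
-- fuel: the pointer strictly increases while 1 ≤ p < nn, so nn.toNat + 1 steps are exact there;
-- for a start p ≤ 0 the Python loop never terminates (such inputs are excluded by Pre_).
def pvBitAddLoop (nn x : Int) : Nat → Int → List Int → List Int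
  | 0, _, data => data
  | fuel+1, p, data =>
    if p < nn then
      pvBitAddLoop nn x fuel (p + pvLowbit p)
        (PySem.List.pySetD data p (PySem.List.pyGetD data p 0 + x))
    else data

def pvBitAdd (nn : Int) (data : List Int) (p x : Int) : List Int :=
  pvBitAddLoop nn x (nn.toNat + 1) (p + 1) data

-- BIT.sum0: `s = 0; while r > 0: s += self.data[r]; r -= r & -r`
-- (fuel: r strictly decreases while positive, so r.toNat + 1 steps are exact)
def pvBitSum0Loop (data : List Int) : Nat → Int → Int → Int
  | 0, _, s => s
  | fuel+1, r, s =>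
    if 0 < r then pvBitSum0Loop data fuel (r - pvLowbit r) (s + PySem.List.pyGetD data r 0) else s

def pvBitSum0 (data : List Int) (r : Int) : Int := pvBitSum0Loop data (r.toNat + 1) r 0

-- BIT.sum: `return self.sum0(r) - self.sum0(l)`
def pvBitSum (data : List Int) (l r : Int) : Int := pvBitSum0 data r - pvBitSum0 data l

-- `order = {x:i for i,x in enumerate(sorted(set(lst)))}; lst = [order[x] for x in lst]`
-- (`order[x]` never raises KeyError: every x of lst is a key, so getD is exact there)
def pvCompress (lst : List Int) : List Int :=
  let s := PySem.List.sorted (PySem.Set.ofList lst) (fun x => x) false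
  let order : PySem.Dict Int Int :=
    (PySem.List.enumerate s).foldl (fun d p => d.insert p.2 p.1) PySem.Dict.empty
  lst.map (fun x => PySem.Dict.getD order x 0)

-- `ft = BIT(n+10); ans = [0]*n; for i in range(n): ans[i] = ft.sum(lst[i]+1, n); ft.add(lst[i], 1)`
def pvMainLoop (lst2 : List Int) (n : Int) : List Int × List Int :=
  (PySem.List.pyRange 0 n 1).foldl
    (fun st i =>
      let v := PySem.List.pyGetD lst2 i 0
      (pvBitAdd (n + 10) st.1 v 1,
       PySem.List.pySetD st.2 i (pvBitSum st.1 (v + 1) n)))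
    (List.replicate ((n + 10) + 1).toNat 0, List.replicate n.toNat 0)

def inversion_cnt (lst : List Int) : List Int :=
  let n : Int := lst.length
  -- `maxlst = max(lst)`: ValueError on the empty list, excluded by Pre_
  let maxlst := (PySem.List.max? lst (fun x => x)).getD 0
  let lst2 := if n + 10 ≤ maxlst then pvCompress lst else lst
  (pvMainLoop lst2 n).2

-- ===== PORT B =====
-- `res.append(sum(1 for y in lst[:i] if y > x))` for each (i, x) in enumerate(lst)
def inversion_cnt_alt (lst : List Int) : List Int :=
  (PySem.List.enumerate lst).map (fun ix =>
    (((PySem.List.slice lst none (some ix.1)).countP (fun y => decide (ix.2 < y)) : Nat) : Int))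

-- ===== PRECONDITION & SPEC =====
-- Pre_ excludes the empty list (max(lst) raises ValueError) and the lists that skip compression
-- (no element ≥ n+10) while containing a negative element, on which A's add-loop never terminates.
def Pre_inversion_cnt (lst : List Int) : Prop :=
  lst ≠ [] ∧ ((∀ x ∈ lst, 0 ≤ x) ∨ ∃ x ∈ lst, (lst.length : Int) + 10 ≤ x)
instance (lst : List Int) : Decidable (Pre_inversion_cnt lst) := by unfold Pre_inversion_cnt; infer_instance
def pvWitness_inversion_cnt : List Int := [0]

-- On nonempty lists of nonnegative ints with every element < n+10 (A skips coordinate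
-- compression yet elements can overflow its Fenwick query range), exactly when an element ≥ n
-- precedes an element ≤ n+8, or an element in a residual band around n+9-lowbit(n+10) precedes an
-- element equal to n+9, A returns silent under-counts and even negative counts, while B returns
-- the true counts of earlier greater elements, which is the function's documented purpose
-- (witness [9, 1]).
def D_inversion_cnt (lst : List Int) : Prop :=
  (∀ x ∈ lst, x < (lst.length : Int) + 10) ∧
  ∃ i : Fin lst.length, ∃ j : Fin lst.length, (j : Nat) < (i : Nat) ∧
    ((lst[i] ≤ (lst.length : Int) + 8 ∧ (lst.length : Int) ≤ lst[j]) ∨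
     (lst[i] = (lst.length : Int) + 9 ∧
      min ((lst.length : Int) - 1)
          ((lst.length : Int) + 9 - PySem.Int.band ((lst.length : Int) + 10) (-((lst.length : Int) + 10)))
        < lst[j] ∧
      lst[j] ≤ max ((lst.length : Int) - 1)
          ((lst.length : Int) + 9 - PySem.Int.band ((lst.length : Int) + 10) (-((lst.length : Int) + 10)))))
instance (lst : List Int) : Decidable (D_inversion_cnt lst) := by unfold D_inversion_cnt; infer_instance

def Spec_inversion_cnt (lst : List Int) (out : List Int) : Prop :=
  ¬ D_inversion_cnt lst → out = inversion_cnt_alt lst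
instance (lst : List Int) (out : List Int) : Decidable (Spec_inversion_cnt lst out) := by
  unfold Spec_inversion_cnt; infer_instance

def pvDiffWitness_inversion_cnt : List Int := [9, 1]
def pvDiffWitnessOut_inversion_cnt : (List Int) × (List Int) := ([0, 0], [0, 1])

-- ===== CLAIM (what is proved, stated in full; the proofs are below) =====
def Claim_unchanged_inversion_cnt : Prop :=
  ∀ (lst : List Int), Dom_inversion_cnt lst → Pre_inversion_cnt lst →
    Spec_inversion_cnt lst (inversion_cnt lst)
def Claim_changed_inversion_cnt : Prop :=
  Dom_inversion_cnt (pvDiffWitness_inversion_cnt) ∧ Pre_inversion_cnt (pvDiffWitness_inversion_cnt) ∧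
  D_inversion_cnt (pvDiffWitness_inversion_cnt) ∧
  inversion_cnt (pvDiffWitness_inversion_cnt) = pvDiffWitnessOut_inversion_cnt.1 ∧
  inversion_cnt_alt (pvDiffWitness_inversion_cnt) = pvDiffWitnessOut_inversion_cnt.2 ∧
  pvDiffWitnessOut_inversion_cnt.1 ≠ pvDiffWitnessOut_inversion_cnt.2

-- ===== LEMMAS AND PROOFS =====

-- the common value: entry k is the number of earlier elements greater than lst[k]
def pvTarget (lst2 : List Int) (k : Nat) : Int :=
  (((lst2.take k).countP (fun y => decide (lst2.getD k 0 < y)) : Nat) : Int)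
def pvCnts (lst2 : List Int) : List Int := (List.range lst2.length).map (pvTarget lst2)

-- Nat-side lowest set bit
def pvLbN (m : Nat) : Nat := m - (m &&& (m-1))

lemma pvAnd1 (k : Nat) : (2*k+1) &&& (2*k) = 2*k := by
  apply Nat.eq_of_testBit_eq; intro i
  cases i with
  | zero => simp [Nat.testBit_zero, Nat.and_comm]
  | succ j =>
    have e1 : (2*k+1)/2 = k := by omega
    have e2 : (2*k)/2 = k := by omega
    rw [Nat.testBit_and]
    simp [Nat.testBit_succ, e1, e2]
lemma pvAnd2 (k : Nat) (h : 1 ≤ k) : (2*k) &&& (2*k-1) = 2*(k &&& (k-1)) := by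
  have h2 : 2*k-1 = 2*(k-1)+1 := by omega
  apply Nat.eq_of_testBit_eq; intro i
  cases i with
  | zero => simp [Nat.testBit_zero, h2]
  | succ j =>
    have e1 : (2*k)/2 = k := by omega
    have e2 : (2*(k-1)+1)/2 = k-1 := by omega
    have e3 : (2*(k &&& (k-1)))/2 = k &&& (k-1) := by omega
    rw [h2, Nat.testBit_and]
    simp [Nat.testBit_succ, e1, e2, e3, Nat.testBit_and]
lemma pvLbN_odd (k : Nat) : pvLbN (2*k+1) = 1 := by
  unfold pvLbN
  rw [show 2*k+1-1 = 2*k by omega, pvAnd1]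
  omega
lemma pvLbN_even (k : Nat) (h : 1 ≤ k) : pvLbN (2*k) = 2 * pvLbN k := by
  unfold pvLbN
  rw [pvAnd2 k h]
  have h1 : k &&& (k-1) ≤ k := Nat.and_le_left
  omega
lemma pvLbN_le (m : Nat) : pvLbN m ≤ m := Nat.sub_le _ _
lemma pvLbN_pos (m : Nat) (h : 1 ≤ m) : 1 ≤ pvLbN m := by
  induction m using Nat.strong_induction_on with
  | _ m ih =>
    rcases Nat.even_or_odd m with ⟨M, hM⟩ | ⟨M, hM⟩
    · have hM1 : 1 ≤ M := by omega
      have := ih M (by omega) hM1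
      rw [show m = 2*M by omega, pvLbN_even M hM1]; omega
    · rw [hM, pvLbN_odd]
lemma pvB1 (q p : Nat) (hp : 1 ≤ p) (hpq : p < q) (h : q - pvLbN q < p) : p + pvLbN p ≤ q := by
  induction q using Nat.strong_induction_on generalizing p with
  | _ q ih =>
    rcases Nat.even_or_odd q with ⟨Q, hQ⟩ | ⟨Q, hQ⟩
    · have hQ1 : 1 ≤ Q := by omega
      have hlbQ : pvLbN q = 2 * pvLbN Q := by rw [show q = 2*Q by omega]; exact pvLbN_even Q hQ1
      have hlbQle := pvLbN_le Q
      rcases Nat.even_or_odd p with ⟨P, hP⟩ | ⟨P, hP⟩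
      · have hP1 : 1 ≤ P := by omega
        have hlbP : pvLbN p = 2 * pvLbN P := by rw [show p = 2*P by omega]; exact pvLbN_even P hP1
        have := ih Q (by omega) (p := P) hP1 (by omega) (by omega)
        omega
      · have hlbP : pvLbN p = 1 := by rw [show p = 2*P+1 by omega]; exact pvLbN_odd P
        omega
    · have hlbQ : pvLbN q = 1 := by rw [show q = 2*Q+1 by omega]; exact pvLbN_odd Q
      omega
lemma pvB2 (q p : Nat) (hp : 1 ≤ p) (hpq : p < q) (h1 : q - pvLbN q < p + pvLbN p)
    (h2 : p + pvLbN p ≤ q) : q - pvLbN q < p := by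
  induction q using Nat.strong_induction_on generalizing p with
  | _ q ih =>
    rcases Nat.even_or_odd q with ⟨Q, hQ⟩ | ⟨Q, hQ⟩
    · have hQ1 : 1 ≤ Q := by omega
      have hlbQ : pvLbN q = 2 * pvLbN Q := by rw [show q = 2*Q by omega]; exact pvLbN_even Q hQ1
      have hlbQle := pvLbN_le Q
      rcases Nat.even_or_odd p with ⟨P, hP⟩ | ⟨P, hP⟩
      · have hP1 : 1 ≤ P := by omega
        have hlbP : pvLbN p = 2 * pvLbN P := by rw [show p = 2*P by omega]; exact pvLbN_even P hP1
        have := ih Q (by omega) (p := P) hP1 (by omega) (by omega) (by omega)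
        omega
      · have hlbP : pvLbN p = 1 := by rw [show p = 2*P+1 by omega]; exact pvLbN_odd P
        omega
    · have hlbQ : pvLbN q = 1 := by rw [show q = 2*Q+1 by omega]; exact pvLbN_odd Q
      have hplb := pvLbN_le p
      have hppos := pvLbN_pos p hp
      -- p + lb p = q is impossible: parity
      rcases Nat.even_or_odd p with ⟨P, hP⟩ | ⟨P, hP⟩
      · have hP1 : 1 ≤ P := by omega
        have hlbP : pvLbN p = 2 * pvLbN P := by rw [show p = 2*P by omega]; exact pvLbN_even P hP1
        omega
      · have hlbP : pvLbN p = 1 := by rw [show p = 2*P+1 by omega]; exact pvLbN_odd P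
        omega

lemma pvLowbit_eq (p : Int) (hp : 1 ≤ p) : pvLowbit p = (pvLbN p.toNat : Int) := by
  unfold pvLowbit pvLbN
  simp only [PySem.Int.band, neg_neg]
  rw [if_pos (by omega), if_neg (by omega)]
  have h : (p-1).toNat = p.toNat - 1 := by omega
  rw [h]
lemma pvLowbit_pos (p : Int) (hp : 1 ≤ p) : 1 ≤ pvLowbit p := by
  rw [pvLowbit_eq p hp]
  have := pvLbN_pos p.toNat (by omega)
  omega
lemma pvLowbit_le (p : Int) (hp : 1 ≤ p) : pvLowbit p ≤ p := by
  rw [pvLowbit_eq p hp]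
  have := pvLbN_le p.toNat
  omega
lemma pvChainB1 (p q : Int) (hp : 1 ≤ p) (hpq : p < q) (h : q - pvLowbit q < p) :
    p + pvLowbit p ≤ q := by
  have hq : 1 ≤ q := by omega
  rw [pvLowbit_eq p hp, pvLowbit_eq q hq] at *
  have := pvB1 q.toNat p.toNat (by omega) (by omega) (by have := pvLbN_le q.toNat; omega)
  have := pvLbN_le q.toNat
  omega
lemma pvChainB2 (p q : Int) (hp : 1 ≤ p) (hpq : p < q) (h1 : q - pvLowbit q < p + pvLowbit p)
    (h2 : p + pvLowbit p ≤ q) : q - pvLowbit q < p := by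
  have hq : 1 ≤ q := by omega
  rw [pvLowbit_eq p hp, pvLowbit_eq q hq] at *
  have hle := pvLbN_le q.toNat
  have hlep := pvLbN_le p.toNat
  have := pvB2 q.toNat p.toNat (by omega) (by omega) (by omega) (by omega)
  omega

lemma pvBitAddLoop_length (nn x : Int) :
    ∀ (fuel : Nat) (p : Int) (data : List Int),
      (pvBitAddLoop nn x fuel p data).length = data.length := by
  intro fuel
  induction fuel with
  | zero => intro p data; rfl
  | succ f ih =>
    intro p data
    simp only [pvBitAddLoop]
    split
    · rw [ih, PySem.List.length_pySetD]
    · rfl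

lemma pvBitAddLoop_get (nn x : Int) :
    ∀ (fuel : Nat) (p : Int) (data : List Int) (q : Int),
      1 ≤ p → 1 ≤ q → q ≤ nn - 1 → (nn + 1).toNat = data.length → (nn - p).toNat < fuel →
      PySem.List.pyGetD (pvBitAddLoop nn x fuel p data) q 0
        = PySem.List.pyGetD data q 0 + (if q - pvLowbit q < p ∧ p ≤ q then x else 0) := by
  intro fuel
  induction fuel with
  | zero => intro p data q _ _ _ _ hf; omega
  | succ f ih =>
    intro p data q hp hq hqnn hlen hf
    simp only [pvBitAddLoop]
    by_cases hpn : p < nn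
    · rw [if_pos hpn]
      have hlb := pvLowbit_pos p hp
      have hlbq := pvLowbit_pos q hq
      have hplen : p.toNat < data.length := by omega
      have hcastp : ((p.toNat : Nat) : Int) = p := by omega
      have hcastq : ((q.toNat : Nat) : Int) = q := by omega
      have hsetget : ∀ w : Int, PySem.List.pyGetD (PySem.List.pySetD data p w) q 0
          = if q = p then w else PySem.List.pyGetD data q 0 := by
        intro w
        have h := PySem.List.pyGetD_pySetD_natCast data p.toNat q.toNat w 0 hplen
        rw [hcastp, hcastq] at h
        rw [h]
        by_cases hqp : q = p
        · rw [if_pos (by omega), if_pos hqp]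
        · rw [if_neg (by omega), if_neg hqp]
      rw [ih (p + pvLowbit p) _ q (by omega) hq hqnn
            (by rw [PySem.List.length_pySetD]; exact hlen) (by omega), hsetget]
      by_cases hqp : q = p
      · rw [if_pos hqp, if_neg (by subst hqp; intro ⟨_, h2⟩; omega),
            if_pos (by subst hqp; exact ⟨by omega, le_refl q⟩)]
        subst hqp; ring
      · rw [if_neg hqp]
        by_cases hlt : p < q
        · have hiff : (q - pvLowbit q < p ∧ p ≤ q) ↔
              (q - pvLowbit q < p + pvLowbit p ∧ p + pvLowbit p ≤ q) := by
            constructor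
            · intro ⟨h1, _⟩
              have := pvChainB1 p q hp hlt h1
              constructor <;> omega
            · intro ⟨h1, h2⟩
              exact ⟨pvChainB2 p q hp hlt h1 h2, by omega⟩
          by_cases hc : q - pvLowbit q < p ∧ p ≤ q
          · rw [if_pos (hiff.mp hc), if_pos hc]
          · rw [if_neg (fun h => hc (hiff.mpr h)), if_neg hc]
        · have h1 : ¬ (q - pvLowbit q < p + pvLowbit p ∧ p + pvLowbit p ≤ q) := by
            intro ⟨_, h2⟩; omega
          have h2 : ¬ (q - pvLowbit q < p ∧ p ≤ q) := by intro ⟨_, h2⟩; omega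
          rw [if_neg h1, if_neg h2]
    · rw [if_neg hpn, if_neg (by intro ⟨_, h2⟩; omega)]
      ring

lemma pvCountP_split (S : List Int) (a b : Int) (hab : a ≤ b) :
    S.countP (fun v => decide (v ≤ b))
      = S.countP (fun v => decide (v ≤ a)) + S.countP (fun v => decide (a < v ∧ v ≤ b)) := by
  induction S with
  | nil => simp
  | cons v S ih =>
    simp only [List.countP_cons, ih]
    simp only [decide_eq_true_eq]
    split_ifs <;> omega

lemma pvBitSum0Loop_eq (data : List Int) (S : List Int) (nn : Int)
    (hS : ∀ v ∈ S, 1 ≤ v)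
    (hdata : ∀ q : Int, 1 ≤ q → q ≤ nn - 1 →
      PySem.List.pyGetD data q 0
        = ((S.countP (fun v => decide (q - pvLowbit q < v ∧ v ≤ q)) : Nat) : Int)) :
    ∀ (fuel : Nat) (r s : Int), r ≤ nn - 1 → r.toNat < fuel →
      pvBitSum0Loop data fuel r s = s + ((S.countP (fun v => decide (v ≤ r)) : Nat) : Int) := by
  intro fuel
  induction fuel with
  | zero => intro r s _ hf; omega
  | succ f ih =>
    intro r s hr hf
    simp only [pvBitSum0Loop]
    by_cases h0 : 0 < r
    · rw [if_pos h0]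
      have hlb := pvLowbit_pos r (by omega)
      have hlble := pvLowbit_le r (by omega)
      rw [ih (r - pvLowbit r) _ (by omega) (by omega)]
      rw [hdata r (by omega) hr]
      rw [pvCountP_split S (r - pvLowbit r) r (by omega)]
      push_cast
      ring
    · rw [if_neg h0]
      have : S.countP (fun v => decide (v ≤ r)) = 0 := by
        rw [List.countP_eq_zero]
        intro v hv
        have := hS v hv
        simp; omega
      rw [this]
      simp

lemma pvBitAddLoop_ge (nn x : Int) :
    ∀ (fuel : Nat) (p : Int) (data : List Int),
      1 ≤ p → (nn + 1).toNat = data.length → 0 ≤ nn →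
      PySem.List.pyGetD (pvBitAddLoop nn x fuel p data) nn 0 = PySem.List.pyGetD data nn 0 := by
  intro fuel
  induction fuel with
  | zero => intro p data _ _ _; rfl
  | succ f ih =>
    intro p data hp hlen hnn
    simp only [pvBitAddLoop]
    by_cases hpn : p < nn
    · rw [if_pos hpn]
      have hlb := pvLowbit_pos p hp
      have hplen : p.toNat < data.length := by omega
      have hcastp : ((p.toNat : Nat) : Int) = p := by omega
      have hcastq : ((nn.toNat : Nat) : Int) = nn := by omega
      rw [ih (p + pvLowbit p) _ (by omega) (by rw [PySem.List.length_pySetD]; exact hlen) hnn]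
      have h := PySem.List.pyGetD_pySetD_natCast data p.toNat nn.toNat
        (PySem.List.pyGetD data p 0 + x) 0 hplen
      rw [hcastp, hcastq] at h
      rw [h, if_neg (by omega)]
    · rw [if_neg hpn]

lemma pvBitSum0_nn (data S : List Int) (nn : Int) (hnn : 0 < nn)
    (hS : ∀ v ∈ S, 1 ≤ v)
    (hdata : ∀ q : Int, 1 ≤ q → q ≤ nn - 1 →
      PySem.List.pyGetD data q 0
        = ((S.countP (fun v => decide (q - pvLowbit q < v ∧ v ≤ q)) : Nat) : Int))
    (hzero : PySem.List.pyGetD data nn 0 = 0) :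
    pvBitSum0 data nn = ((S.countP (fun v => decide (v ≤ nn - pvLowbit nn)) : Nat) : Int) := by
  unfold pvBitSum0
  simp only [pvBitSum0Loop]
  rw [if_pos hnn, hzero]
  have hL := pvLowbit_pos nn (by omega)
  have hLle := pvLowbit_le nn (by omega)
  rw [pvBitSum0Loop_eq data S nn hS hdata nn.toNat (nn - pvLowbit nn) _ (by omega) (by omega)]
  omega

lemma pvMainLoop_eq (lst2 : List Int)
    (hgood : ∀ v ∈ lst2, 0 ≤ v ∧ v < (lst2.length : Int) + 10)
    (hnice : ∀ (k j : Nat) (hk : k < lst2.length) (hj : j < k),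
      (lst2[k] ≤ (lst2.length : Int) + 8 → lst2[j] < (lst2.length : Int)) ∧
      (lst2[k] = (lst2.length : Int) + 9 →
        ¬(min ((lst2.length : Int) - 1) ((lst2.length : Int) + 9 - pvLowbit ((lst2.length : Int) + 10))
            < lst2[j] ∧
          lst2[j] ≤ max ((lst2.length : Int) - 1)
            ((lst2.length : Int) + 9 - pvLowbit ((lst2.length : Int) + 10))))) :
    (pvMainLoop lst2 (lst2.length : Int)).2 = pvCnts lst2 := by
  have hgood' := hgood
  unfold pvMainLoop
  rw [PySem.List.pyRange_zero_natCast lst2.length, List.foldl_map]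
  have key : ∀ k : Nat, k ≤ lst2.length →
      (List.foldl
        (fun st (j : Nat) =>
          (fun (st : List Int × List Int) (i : Int) =>
            let v := PySem.List.pyGetD lst2 i 0
            (pvBitAdd ((lst2.length : Int) + 10) st.1 v 1,
             PySem.List.pySetD st.2 i (pvBitSum st.1 (v + 1) (lst2.length : Int)))) st (j : Int))
        (List.replicate (((lst2.length : Int) + 10) + 1).toNat 0,
         List.replicate ((lst2.length : Int)).toNat 0)
        (List.range k)).1.length = (((lst2.length : Int) + 10) + 1).toNat ∧
      (∀ q : Int, 1 ≤ q → q ≤ ((lst2.length : Int) + 10) - 1 →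
        PySem.List.pyGetD (List.foldl
        (fun st (j : Nat) =>
          (fun (st : List Int × List Int) (i : Int) =>
            let v := PySem.List.pyGetD lst2 i 0
            (pvBitAdd ((lst2.length : Int) + 10) st.1 v 1,
             PySem.List.pySetD st.2 i (pvBitSum st.1 (v + 1) (lst2.length : Int)))) st (j : Int))
        (List.replicate (((lst2.length : Int) + 10) + 1).toNat 0,
         List.replicate ((lst2.length : Int)).toNat 0)
        (List.range k)).1 q 0
          = ((((lst2.take k).map (· + 1)).countP
              (fun v => decide (q - pvLowbit q < v ∧ v ≤ q)) : Nat) : Int)) ∧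
      PySem.List.pyGetD (List.foldl
        (fun st (j : Nat) =>
          (fun (st : List Int × List Int) (i : Int) =>
            let v := PySem.List.pyGetD lst2 i 0
            (pvBitAdd ((lst2.length : Int) + 10) st.1 v 1,
             PySem.List.pySetD st.2 i (pvBitSum st.1 (v + 1) (lst2.length : Int)))) st (j : Int))
        (List.replicate (((lst2.length : Int) + 10) + 1).toNat 0,
         List.replicate ((lst2.length : Int)).toNat 0)
        (List.range k)).1 ((lst2.length : Int) + 10) 0 = 0 ∧
      (List.foldl
        (fun st (j : Nat) =>
          (fun (st : List Int × List Int) (i : Int) =>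
            let v := PySem.List.pyGetD lst2 i 0
            (pvBitAdd ((lst2.length : Int) + 10) st.1 v 1,
             PySem.List.pySetD st.2 i (pvBitSum st.1 (v + 1) (lst2.length : Int)))) st (j : Int))
        (List.replicate (((lst2.length : Int) + 10) + 1).toNat 0,
         List.replicate ((lst2.length : Int)).toNat 0)
        (List.range k)).2 = (List.range k).map (pvTarget lst2)
          ++ List.replicate (lst2.length - k) 0 := by
    intro k
    induction k with
    | zero =>
      intro _
      refine ⟨by simp, ?_, ?_, by simp⟩
      · intro q hq hqn
        rw [List.range_zero, List.foldl_nil]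
        rw [PySem.List.pyGetD_eq_getElem _ 0 (by omega) (by rw [List.length_replicate]; omega)]
        simp
      · rw [List.range_zero, List.foldl_nil]
        rw [PySem.List.pyGetD_eq_getElem _ 0 (by omega) (by rw [List.length_replicate]; omega)]
        simp
    | succ k ih =>
      intro hk1
      obtain ⟨hlen, hdata, hzero, hans⟩ := ih (by omega)
      have hk : k < lst2.length := by omega
      rw [List.range_succ, List.foldl_append, List.foldl_cons, List.foldl_nil]
      set st := (List.foldl
        (fun st (j : Nat) =>
          (fun (st : List Int × List Int) (i : Int) =>
            let v := PySem.List.pyGetD lst2 i 0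
            (pvBitAdd ((lst2.length : Int) + 10) st.1 v 1,
             PySem.List.pySetD st.2 i (pvBitSum st.1 (v + 1) (lst2.length : Int)))) st (j : Int))
        (List.replicate (((lst2.length : Int) + 10) + 1).toNat 0,
         List.replicate ((lst2.length : Int)).toNat 0)
        (List.range k)) with hstdef
      have hv : PySem.List.pyGetD lst2 (k : Int) 0 = lst2[k] := by
        rw [PySem.List.pyGetD_natCast, List.getD_eq_getElem lst2 0 hk]
      have hvb := hgood' lst2[k] (List.getElem_mem hk)
      have hS1 : ∀ w ∈ (lst2.take k).map (· + 1), 1 ≤ w := by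
        intro w hw
        obtain ⟨y, hy, rfl⟩ := List.mem_map.mp hw
        have := hgood' y (List.mem_of_mem_take hy)
        omega
      have hearlier : ∀ y ∈ lst2.take k, ∃ j : Nat, ∃ hj : j < k, lst2[j] = y := by
        intro y hy
        obtain ⟨j, hjl, hje⟩ := List.mem_iff_getElem.mp hy
        have hjk : j < k := by
          have := hjl
          rw [List.length_take] at this
          omega
        exact ⟨j, hjk, by rw [← hje, List.getElem_take]⟩
      have htklen : (lst2.take k).length = k := by rw [List.length_take]; omega
      -- the queried sum is the inversion count of position k
      have hsum : pvBitSum st.1 (lst2[k] + 1) (lst2.length : Int) = pvTarget lst2 k := by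
        by_cases hcor : lst2[k] = (lst2.length : Int) + 9
        · -- corner: lst[k] = n+9, query hits the unwritten tree root
          unfold pvBitSum
          have hq1 : lst2[k] + 1 = (lst2.length : Int) + 10 := by omega
          rw [hq1, pvBitSum0_nn st.1 _ _ (by omega) hS1 hdata hzero]
          unfold pvBitSum0
          rw [pvBitSum0Loop_eq st.1 _ _ hS1 hdata _ _ 0 (by omega) (by omega)]
          have hL := pvLowbit_pos ((lst2.length : Int) + 10) (by omega)
          have hLle := pvLowbit_le ((lst2.length : Int) + 10) (by omega)
          have hceq : ((lst2.take k).map (· + 1)).countP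
                (fun v => decide (v ≤ (lst2.length : Int)))
              = ((lst2.take k).map (· + 1)).countP
                (fun v => decide (v ≤ (lst2.length : Int) + 10
                  - pvLowbit ((lst2.length : Int) + 10))) := by
            apply List.countP_congr
            intro w hw
            obtain ⟨y, hy, rfl⟩ := List.mem_map.mp hw
            obtain ⟨j, hj, rfl⟩ := hearlier y hy
            have hband := (hnice k j hk hj).2 hcor
            simp only [decide_eq_true_eq]
            constructor <;> intro <;> omega
          have hzt : (lst2.take k).countP (fun y => decide (lst2.getD k 0 < y)) = 0 := by
            rw [List.countP_eq_zero]
            intro y hy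
            have := hgood' y (List.mem_of_mem_take hy)
            rw [List.getD_eq_getElem lst2 0 hk]
            simp only [decide_eq_true_eq]
            omega
          unfold pvTarget
          rw [hzt, hceq]
          omega
        · -- ordinary position: lst[k] ≤ n+8, every earlier element is < n
          have hcap : lst2[k] ≤ (lst2.length : Int) + 8 := by omega
          have hearly : ∀ y ∈ lst2.take k, y < (lst2.length : Int) := by
            intro y hy
            obtain ⟨j, hj, rfl⟩ := hearlier y hy
            exact (hnice k j hk hj).1 hcap
          unfold pvBitSum pvBitSum0
          rw [pvBitSum0Loop_eq st.1 _ _ hS1 hdata _ _ 0 (by omega) (by omega),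
              pvBitSum0Loop_eq st.1 _ _ hS1 hdata _ _ 0 (by omega) (by omega)]
          have hc1 : ((lst2.take k).map (· + 1)).countP
              (fun v => decide (v ≤ (lst2.length : Int))) = k := by
            have hall : ∀ w ∈ (lst2.take k).map (· + 1),
                (decide (w ≤ (lst2.length : Int))) = true := by
              intro w hw
              obtain ⟨y, hy, rfl⟩ := List.mem_map.mp hw
              have := hearly y hy
              simp; omega
            rw [List.countP_eq_length.mpr hall, List.length_map]
            exact htklen
          have hc2 : ((lst2.take k).map (· + 1)).countP (fun v => decide (v ≤ lst2[k] + 1))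
              = (lst2.take k).countP (fun y => decide (¬ lst2[k] < y)) := by
            rw [List.countP_map]
            apply List.countP_congr
            intro y _
            simp only [Function.comp_apply, decide_eq_true_eq]
            omega
          have hc3 : (lst2.take k).length
              = (lst2.take k).countP (fun y => decide (lst2[k] < y))
                + (lst2.take k).countP (fun y => decide (¬ lst2[k] < y)) := by
            have := List.length_eq_countP_add_countP (fun y => decide (lst2[k] < y))
              (l := lst2.take k)
            rw [this]
            congr 1
            apply List.countP_congr
            intro y _
            simp
          rw [hc1, hc2]
          unfold pvTarget
          rw [List.getD_eq_getElem lst2 0 hk]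
          omega
      have happ : ((fun (st : List Int × List Int) (i : Int) =>
            let v := PySem.List.pyGetD lst2 i 0
            (pvBitAdd ((lst2.length : Int) + 10) st.1 v 1,
             PySem.List.pySetD st.2 i (pvBitSum st.1 (v + 1) (lst2.length : Int)))) st (k : Int))
          = (pvBitAdd ((lst2.length : Int) + 10) st.1 (PySem.List.pyGetD lst2 (k : Int) 0) 1,
             PySem.List.pySetD st.2 (k : Int)
               (pvBitSum st.1 (PySem.List.pyGetD lst2 (k : Int) 0 + 1) (lst2.length : Int))) := rfl
      rw [happ]
      dsimp only
      refine ⟨?_, ?_, ?_, ?_⟩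
      · simp only [pvBitAdd]
        rw [pvBitAddLoop_length, hlen]
      · intro q hq hqn
        simp only [pvBitAdd]
        rw [hv]
        rw [pvBitAddLoop_get _ _ _ _ _ q (by omega) hq hqn (by rw [hlen]) (by omega), hdata q hq hqn]
        have htake : lst2.take (k+1) = lst2.take k ++ [lst2[k]] := by
          rw [List.take_add_one, List.getElem?_eq_getElem hk]
          rfl
        rw [htake, List.map_append, List.countP_append]
        simp only [List.map_cons, List.map_nil, List.countP_cons, List.countP_nil]
        by_cases hcov : q - pvLowbit q < lst2[k] + 1 ∧ lst2[k] + 1 ≤ q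
        · rw [if_pos hcov, if_pos (by simpa using hcov)]
          push_cast; ring
        · rw [if_neg hcov, if_neg (by simpa using hcov)]
          push_cast; ring
      · simp only [pvBitAdd]
        rw [hv]
        rw [pvBitAddLoop_ge _ _ _ _ _ (by omega) (by rw [hlen]) (by omega)]
        exact hzero
      · rw [hans, hv, hsum]
        have hplen : ((List.range k).map (pvTarget lst2)).length = k := by simp
        rw [PySem.List.pySetD_natCast, List.set_append, hplen, if_neg (by omega)]
        have hrep : List.replicate (lst2.length - k) (0 : Int)
            = 0 :: List.replicate (lst2.length - (k+1)) 0 := by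
          rw [show lst2.length - k = (lst2.length - (k+1)) + 1 by omega, List.replicate_succ]
        rw [hrep]
        simp
  obtain ⟨_, _, _, hans⟩ := key lst2.length (le_refl _)
  rw [hans]
  simp [pvCnts]


lemma pvCompress_eq (lst : List Int) :
    pvCompress lst
      = lst.map (fun x => ((PySem.List.sorted (PySem.Set.ofList lst) (fun x => x) false).idxOf x : Int)) := by
  unfold pvCompress
  apply List.map_congr_left
  intro x hx
  have hs : x ∈ PySem.List.sorted (PySem.Set.ofList lst) (fun x => x) false := by
    rw [PySem.List.mem_sorted, PySem.Set.mem_ofList]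
    exact hx
  set s := PySem.List.sorted (PySem.Set.ofList lst) (fun x => x) false with hsdef
  have hnd : s.Nodup := (PySem.List.sorted_perm _ _ _).nodup_iff.mpr (PySem.Set.nodup_ofList lst)
  have hitems := PySem.Dict.items_foldl_insert_fresh (PySem.List.enumerate s)
      (fun p => p.2) (fun p => p.1) PySem.Dict.empty
      (fun a _ => PySem.Dict.contains_empty _)
      (by rw [PySem.List.map_snd_enumerate]; exact hnd)
  have hidx : List.idxOf x s < s.length := List.idxOf_lt_length_of_mem hs
  have hgetelem : s[List.idxOf x s] = x := List.getElem_idxOf hidx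
  have henum : ((List.idxOf x s : Int), x) ∈ PySem.List.enumerate s := by
    have hlen : List.idxOf x s < (PySem.List.enumerate s).length := by
      rwa [PySem.List.length_enumerate]
    have := List.getElem_mem hlen
    rwa [PySem.List.getElem_enumerate s 0 _ hlen, zero_add, hgetelem] at this
  have hmemitems : (x, (List.idxOf x s : Int)) ∈
      ((PySem.List.enumerate s).foldl (fun d p => d.insert p.2 p.1) PySem.Dict.empty).items := by
    rw [hitems]
    exact List.mem_append.mpr (Or.inr (List.mem_map_of_mem henum))
  have hkeys : ((PySem.List.enumerate s).foldl (fun d p => d.insert p.2 p.1)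
      PySem.Dict.empty).keys.Nodup := by
    rw [PySem.Dict.keys.eq_1, hitems]
    simp only [PySem.Dict.empty, List.nil_append, List.map_map]
    have h2 : ((fun (x : Int × Int) => x.1) ∘ fun (a : Int × Int) => (a.2, a.1))
        = (fun (p : Int × Int) => p.2) := rfl
    rw [h2, PySem.List.map_snd_enumerate]
    exact hnd
  have hget : ((PySem.List.enumerate s).foldl (fun d p => d.insert p.2 p.1)
      PySem.Dict.empty).get? x = some (List.idxOf x s : Int) :=
    PySem.Dict.get?_of_mem_items _ hmemitems hkeys
  exact PySem.Dict.getD_of_get?_eq_some _ 0 hget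

lemma pvCnts_map_mono (lst : List Int) (f : Int → Int)
    (hmono : ∀ x ∈ lst, ∀ y ∈ lst, x < y ↔ f x < f y) :
    pvCnts (lst.map f) = pvCnts lst := by
  unfold pvCnts pvTarget
  apply List.ext_getElem
  · simp
  · intro k h1 h2
    have hk : k < lst.length := by simpa using h2
    simp only [List.getElem_map, List.getElem_range]
    rw [List.getD_eq_getElem (lst.map f) 0 (by simpa using hk),
        List.getD_eq_getElem lst 0 hk, List.getElem_map]
    rw [← List.map_take, List.countP_map]
    congr 1
    apply List.countP_congr
    intro y hy
    have hymem : y ∈ lst := List.mem_of_mem_take hy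
    have hkmem : lst[k] ∈ lst := List.getElem_mem hk
    simp only [Function.comp_apply, decide_eq_true_eq]
    exact (hmono _ hkmem _ hymem).symm

lemma pvAlt_eq_cnts (lst : List Int) : inversion_cnt_alt lst = pvCnts lst := by
  unfold inversion_cnt_alt pvCnts
  apply List.ext_getElem
  · simp [PySem.List.length_enumerate]
  · intro k h1 h2
    have hk : k < lst.length := by simpa using h2
    simp only [List.getElem_map, List.getElem_range,
      PySem.List.getElem_enumerate lst 0 k (by simpa [PySem.List.length_enumerate] using hk),
      zero_add]
    rw [PySem.List.slice_to_natCast]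
    unfold pvTarget
    congr 2
    rw [List.getD_eq_getElem lst 0 hk]

lemma pvA_eq_cnts (lst : List Int) (hpre : Pre_inversion_cnt lst) (hD : ¬ D_inversion_cnt lst) :
    inversion_cnt lst = pvCnts lst := by
  obtain ⟨hne, hdisj⟩ := hpre
  unfold inversion_cnt
  dsimp only
  by_cases hbr : (lst.length : Int) + 10 ≤ (PySem.List.max? lst (fun x => x)).getD 0
  · -- compression branch
    rw [if_pos hbr, pvCompress_eq]
    set s := PySem.List.sorted (PySem.Set.ofList lst) (fun x => x) false with hsdef
    set f := fun x : Int => ((s.idxOf x : Nat) : Int) with hfdef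
    have hslen : s.length ≤ lst.length := by
      rw [hsdef, PySem.List.length_sorted]
      exact PySem.Set.length_ofList_le lst
    have hmem : ∀ x ∈ lst, x ∈ s := by
      intro x hx
      rw [hsdef, PySem.List.mem_sorted, PySem.Set.mem_ofList]
      exact hx
    have hfsmall : ∀ x ∈ lst, f x < (lst.length : Int) := by
      intro x hx
      have hidx : s.idxOf x < s.length := List.idxOf_lt_length_of_mem (hmem x hx)
      have h2 : s.idxOf x < lst.length := by omega
      simp only [hfdef]
      exact_mod_cast h2
    have hgood : ∀ v ∈ lst.map f, 0 ≤ v ∧ v < ((lst.map f).length : Int) + 10 := by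
      intro v hv
      obtain ⟨x, hx, rfl⟩ := List.mem_map.mp hv
      have := hfsmall x hx
      rw [List.length_map]
      constructor
      · positivity
      · omega
    have hnice : ∀ (k j : Nat) (hk : k < (lst.map f).length) (hj : j < k),
        ((lst.map f)[k] ≤ ((lst.map f).length : Int) + 8 →
          (lst.map f)[j] < ((lst.map f).length : Int)) ∧
        ((lst.map f)[k] = ((lst.map f).length : Int) + 9 →
          ¬(min (((lst.map f).length : Int) - 1)
              (((lst.map f).length : Int) + 9 - pvLowbit (((lst.map f).length : Int) + 10))
              < (lst.map f)[j] ∧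
            (lst.map f)[j] ≤ max (((lst.map f).length : Int) - 1)
              (((lst.map f).length : Int) + 9 - pvLowbit (((lst.map f).length : Int) + 10)))) := by
      intro k j hk hj
      have hkl : k < lst.length := by simpa using hk
      have hjl : j < lst.length := by omega
      have hjs : (lst.map f)[j] < ((lst.map f).length : Int) := by
        simp only [List.getElem_map, List.length_map]
        exact hfsmall lst[j] (List.getElem_mem hjl)
      have hks : (lst.map f)[k] < ((lst.map f).length : Int) := by
        simp only [List.getElem_map, List.length_map]
        exact hfsmall lst[k] (List.getElem_mem hkl)
      exact ⟨fun _ => hjs, fun heq => absurd heq (by omega)⟩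
    have hpair : s.Pairwise (· < ·) := PySem.List.sorted_ofList_pairwise_lt lst
    have hmonoidx : ∀ a b : Int, a ∈ lst → b ∈ lst → a < b → s.idxOf a < s.idxOf b := by
      intro a b ha hb hab
      have hia : s.idxOf a < s.length := List.idxOf_lt_length_of_mem (hmem a ha)
      have hib : s.idxOf b < s.length := List.idxOf_lt_length_of_mem (hmem b hb)
      have hga : s[s.idxOf a] = a := List.getElem_idxOf hia
      have hgb : s[s.idxOf b] = b := List.getElem_idxOf hib
      by_contra hcon
      push Not at hcon
      rcases Nat.lt_or_ge (s.idxOf b) (s.idxOf a) with h | h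
      · have := (List.pairwise_iff_getElem.mp hpair) _ _ hib hia h
        rw [hga, hgb] at this
        omega
      · have heq : s.idxOf a = s.idxOf b := by omega
        have hopt : s[s.idxOf a]? = s[s.idxOf b]? := by rw [heq]
        rw [List.getElem?_eq_getElem hia, List.getElem?_eq_getElem hib, hga, hgb] at hopt
        have : a = b := Option.some.inj hopt
        omega
    have hmono : ∀ x ∈ lst, ∀ y ∈ lst, x < y ↔ f x < f y := by
      intro x hx y hy
      constructor
      · intro h
        have := hmonoidx x y hx hy h
        simp only [hfdef]
        exact_mod_cast this
      · intro h
        rcases lt_trichotomy x y with h' | h' | h'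
        · exact h'
        · subst h'; simp [hfdef] at h
        · have := hmonoidx y x hy hx h'
          simp only [hfdef] at h
          omega
    have hlen2 : (lst.length : Int) = ((lst.map f).length : Int) := by simp
    rw [hlen2, pvMainLoop_eq (lst.map f) hgood hnice, pvCnts_map_mono lst f hmono]
  · -- no compression: every value lies in [0, n+10) and ¬D_ rules the bad patterns out
    rw [if_neg hbr]
    obtain ⟨m, hm⟩ : ∃ m, PySem.List.max? lst (fun x => x) = some m := by
      cases hmx : PySem.List.max? lst (fun x => x) with
      | none => exact absurd ((PySem.List.max?_eq_none_iff lst _).mp hmx) hne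
      | some m => exact ⟨m, rfl⟩
    rw [hm] at hbr
    simp only [Option.getD_some] at hbr
    have hmax : ∀ y ∈ lst, y ≤ m := PySem.List.max?_isMax hm
    have hallb : ∀ x ∈ lst, x < (lst.length : Int) + 10 := by
      intro x hx
      have := hmax x hx
      omega
    have hnonneg : ∀ x ∈ lst, 0 ≤ x := by
      rcases hdisj with h | ⟨x0, hx0, hx0b⟩
      · exact h
      · exact absurd (by have := hmax x0 hx0; omega : (lst.length : Int) + 10 ≤ m) hbr
    have hnopair : ∀ (i j : Fin lst.length), (j : Nat) < (i : Nat) →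
        ¬((lst[i] ≤ (lst.length : Int) + 8 ∧ (lst.length : Int) ≤ lst[j]) ∨
          (lst[i] = (lst.length : Int) + 9 ∧
           min ((lst.length : Int) - 1)
               ((lst.length : Int) + 9
                 - PySem.Int.band ((lst.length : Int) + 10) (-((lst.length : Int) + 10))) < lst[j] ∧
           lst[j] ≤ max ((lst.length : Int) - 1)
               ((lst.length : Int) + 9
                 - PySem.Int.band ((lst.length : Int) + 10) (-((lst.length : Int) + 10))))) := by
      intro i j hji hbad
      exact hD ⟨hallb, i, j, hji, hbad⟩
    have hnice : ∀ (k j : Nat) (hk : k < lst.length) (hj : j < k),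
        (lst[k] ≤ (lst.length : Int) + 8 → lst[j] < (lst.length : Int)) ∧
        (lst[k] = (lst.length : Int) + 9 →
          ¬(min ((lst.length : Int) - 1) ((lst.length : Int) + 9 - pvLowbit ((lst.length : Int) + 10))
              < lst[j] ∧
            lst[j] ≤ max ((lst.length : Int) - 1)
              ((lst.length : Int) + 9 - pvLowbit ((lst.length : Int) + 10)))) := by
      intro k j hk hj
      have h := hnopair ⟨k, hk⟩ ⟨j, by omega⟩ hj
      push Not at h
      obtain ⟨h1, h2⟩ := h
      exact ⟨fun hc => by have := h1 hc; omega, fun hc => by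
        have := h2 hc
        unfold pvLowbit
        intro ⟨ha, hb⟩
        exact absurd hb (by simpa using this ha)⟩
    exact pvMainLoop_eq lst (fun v hv => ⟨hnonneg v hv, hallb v hv⟩) hnice

-- ===== VERDICT (by name: the statement is the Claim_ definition above) =====
theorem inversion_cnt_spec : Claim_unchanged_inversion_cnt := by
  intro lst _ hpre hD
  rw [pvA_eq_cnts lst hpre hD, pvAlt_eq_cnts]
theorem inversion_cnt_changed : Claim_changed_inversion_cnt := by
  unfold Claim_changed_inversion_cnt; decide
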